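-- pv_equiv track=rewrite | github.com/august-hw2/25_Programmers_Python | 프로그래머스/0/181829. 이차원 배열 대각선 순회하기/이차원 배열 대각선 순회하기.py | solution
-- ===== SOURCE A (Python) =====
-- def solution(board, k):
--     res = 0
--     for i in range(len(board)):
--         for j in range(len(board[0])):
--             if i+j <= k:
--                 res += board[i][j]
--             else:
--                 break
--     return res
-- ===== SOURCE B (Python) =====
-- def solution(board, k):
--     # Anti-diagonal traversal: visit cells with i+j == d for d = 0..min(k, n+m-2),
--     # with arithmetic bounds instead of row-major scanning with a break.
--     n = len(board)
--     if n == 0: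
--         return 0
--     m = len(board[0])
--     res = 0
--     top = min(k, n + m - 2)
--     for d in range(top + 1):
--         lo = max(0, d - (m - 1))
--         hi = min(d, n - 1)
--         for i in range(lo, hi + 1):
--             res += board[i][d - i]
--     return res
-- ===== Notes on version B (the rewrite author's own statement) =====
-- stated objective: alternative
-- what changed: Replaces the row-major scan with an early break by an anti-diagonal traversal (d = i+j from 0 to min(k, n+m-2)) with closed-form per-diagonal index bounds, so no per-cell condition test or break is needed.
import Mathlib
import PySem

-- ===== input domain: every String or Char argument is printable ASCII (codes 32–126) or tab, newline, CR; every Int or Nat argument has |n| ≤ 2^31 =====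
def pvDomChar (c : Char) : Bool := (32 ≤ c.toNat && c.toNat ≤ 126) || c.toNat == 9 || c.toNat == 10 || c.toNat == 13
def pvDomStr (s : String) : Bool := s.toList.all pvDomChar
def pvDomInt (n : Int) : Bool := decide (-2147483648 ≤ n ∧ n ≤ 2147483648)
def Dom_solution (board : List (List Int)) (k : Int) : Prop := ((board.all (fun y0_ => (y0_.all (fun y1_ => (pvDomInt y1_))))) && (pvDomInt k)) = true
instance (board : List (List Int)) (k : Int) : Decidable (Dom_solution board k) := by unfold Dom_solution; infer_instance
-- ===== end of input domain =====

-- B changes the traversal order (anti-diagonals with arithmetic bounds instead of a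
-- row-major scan with a break); equivalence is about the return value on Pre_ (no mutation).

-- ===== PORT A =====
-- inner 'for j in range(m): if i+j<=k: res+=board[i][j] else: break', recursing on the
-- remaining count c (j is the current index); getD/pyGetD stand for board[i][j], exact on Pre_.
def solInnerA (row : List Int) (i k : Int) : Nat → Nat → Int → Int
  | _, 0, acc => acc
  | j, c+1, acc =>
      if i + (j : Int) ≤ k then solInnerA row i k (j+1) c (acc + row.getD j 0) else acc

-- len(board[0]) is only evaluated when the outer loop runs (board ≠ []), so headD [] is exact.
def solution (board : List (List Int)) (k : Int) : Int :=
  (PySem.List.pyRange 0 (board.length : Int) 1).foldl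
    (fun res i => solInnerA (PySem.List.pyGetD board i []) i k 0 (board.headD []).length res) 0

-- ===== PORT B =====
def solution_alt (board : List (List Int)) (k : Int) : Int :=
  let n : Int := board.length
  if n = 0 then 0
  else
    let m : Int := (board.headD []).length
    let top : Int := min k (n + m - 2)
    (PySem.List.pyRange 0 (top + 1) 1).foldl
      (fun res d =>
        let lo : Int := max 0 (d - (m - 1))
        let hi : Int := min d (n - 1)
        (PySem.List.pyRange lo (hi + 1) 1).foldl
          (fun r i => r + PySem.List.pyGetD (PySem.List.pyGetD board i []) (d - i) 0) res)
      0

-- ===== PRECONDITION & SPEC =====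
-- Pre_ excludes exactly the ragged boards on which Python A raises IndexError: in row i it
-- reads the first min(len(board[0]), max(0, k-i+1)) cells, which must exist.
def Pre_solution (board : List (List Int)) (k : Int) : Prop :=
  ∀ i < board.length,
    min (board.headD []).length (k - (i : Int) + 1).toNat ≤ (board.getD i []).length
instance (board : List (List Int)) (k : Int) : Decidable (Pre_solution board k) := by
  unfold Pre_solution; infer_instance

def pvWitness_solution : List (List Int) × Int := ([[1, 2], [3, 4]], 2)

def Spec_solution (board : List (List Int)) (k : Int) (out : Int) : Prop := out = solution_alt board k
instance (board : List (List Int)) (k : Int) (out : Int) : Decidable (Spec_solution board k out) := by unfold Spec_solution; infer_instance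

-- ===== CLAIM (what is proved, stated in full; the proofs are below) =====
def Claim_equal_solution : Prop := ∀ (board : List (List Int)) (k : Int), Dom_solution board k → Pre_solution board k → Spec_solution board k (solution board k)

-- ===== LEMMAS AND PROOFS =====

-- the common reference value: ∑ i<n, ∑ j<m, [i+j ≤ k] · board[i][j]
def refSum (board : List (List Int)) (k : Int) : Int :=
  ∑ i ∈ Finset.range board.length,
    ∑ j ∈ Finset.range (board.headD []).length,
      if (i : Int) + (j : Int) ≤ k then (board.getD i []).getD j 0 else 0

theorem solInnerA_eq (row : List Int) (i k : Int) :
    ∀ c j acc, solInnerA row i k j c acc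
      = acc + ∑ t ∈ Finset.range c,
          (if i + ((j + t : Nat) : Int) ≤ k then row.getD (j + t) 0 else 0) := by
  intro c
  induction c with
  | zero => intro j acc; simp [solInnerA]
  | succ c ih =>
    intro j acc
    by_cases h : i + (j : Int) ≤ k
    · rw [solInnerA, if_pos h, ih]
      rw [Finset.sum_range_succ']
      simp only [Nat.add_zero]
      rw [if_pos h]
      have : ∀ t, j + 1 + t = j + (t + 1) := by omega
      simp only [this]
      ring
    · rw [solInnerA, if_neg h]
      have hz : ∀ t ∈ Finset.range (c+1),
          (if i + ((j + t : Nat) : Int) ≤ k then row.getD (j + t) 0 else 0) = 0 := by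
        intro t _
        rw [if_neg]
        push_cast
        push_cast at h
        omega
      rw [Finset.sum_congr rfl hz]
      simp

-- list-sum ↔ Finset.range-sum bridge
theorem list_sum_range_eq (f : Nat → Int) (n : Nat) :
    ((List.range n).map f).sum = ∑ i ∈ Finset.range n, f i := by
  induction n with
  | zero => simp
  | succ n ih => simp [List.range_succ, Finset.sum_range_succ, ih]

theorem solution_eq_refSum (board : List (List Int)) (k : Int) :
    solution board k = refSum board k := by
  unfold solution refSum
  rw [PySem.List.pyRange_zero_nat, List.foldl_map]
  have hbody : ∀ (acc : Int), ∀ i ∈ List.range board.length,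
      solInnerA (PySem.List.pyGetD board (i : Int) []) (i : Int) k 0 (board.headD []).length acc
        = acc + ∑ j ∈ Finset.range (board.headD []).length,
            (if (i : Int) + (j : Int) ≤ k then (board.getD i []).getD j 0 else 0) := by
    intro acc i _
    rw [PySem.List.pyGetD_natCast, solInnerA_eq]
    simp only [Nat.zero_add]
  rw [PySem.List.foldl_congr_mem _ _ _ _ hbody, PySem.List.foldl_add, list_sum_range_eq]
  simp

theorem solution_alt_eq_refSum (board : List (List Int)) (k : Int) :
    solution_alt board k = refSum board k := by
  by_cases hn0 : board.length = 0
  · simp [solution_alt, refSum, hn0]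
  · set n : Nat := board.length with hn
    set m : Nat := (board.headD []).length with hm
    set row : Nat → List Int := fun i => board.getD i [] with hrow
    set cell : Nat → Nat → Int := fun i j => (row i).getD j 0 with hcell
    by_cases hk0 : k < 0
    · -- k < 0: B's range is empty; every test i+j ≤ k fails in refSum
      have htop : min k ((n : Int) + (m : Int) - 2) + 1 ≤ 0 := by omega
      have hB : solution_alt board k = 0 := by
        simp only [solution_alt]
        rw [if_neg (by exact_mod_cast hn0)]
        rw [PySem.List.pyRange_one_eq_nil (by omega)]
        rfl
      have hR : refSum board k = 0 := by
        unfold refSum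
        apply Finset.sum_eq_zero
        intro i _
        apply Finset.sum_eq_zero
        intro j _
        rw [if_neg (by omega)]
      rw [hB, hR]
    · -- main case: n ≥ 1, 0 ≤ k
      set K : Nat := k.toNat with hK
      have hkK : k = (K : Int) := by omega
      set D : Nat := (min k ((n : Int) + (m : Int) - 2) + 1).toNat with hD
      -- unfold B and turn the outer loop into a sum over range D
      have hB : solution_alt board k
          = ∑ u ∈ Finset.range D, ∑ i ∈ Finset.range n,
              (if u + 1 - m ≤ i ∧ i ≤ min u (n - 1) then cell i (u - i) else 0) := by
        simp only [solution_alt]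
        rw [if_neg (by exact_mod_cast hn0)]
        rw [PySem.List.pyRange_zero (min k ((n : Int) + (m : Int) - 2) + 1), List.foldl_map]
        have hinner : ∀ (res : Int), ∀ u ∈ List.range D,
            (PySem.List.pyRange (max 0 ((u : Int) - ((m : Int) - 1))) (min (u : Int) ((n : Int) - 1) + 1) 1).foldl
              (fun r i => r + PySem.List.pyGetD (PySem.List.pyGetD board i []) ((u : Int) - i) 0) res
            = res + ∑ i ∈ Finset.range n,
                (if u + 1 - m ≤ i ∧ i ≤ min u (n - 1) then cell i (u - i) else 0) := by
          intro res u _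
          set loN : Nat := u + 1 - m with hloN
          set hiN : Nat := min u (n - 1) with hhiN
          have hlo : (max 0 ((u : Int) - ((m : Int) - 1))) = (loN : Int) := by
            omega
          have hhi : (min (u : Int) ((n : Int) - 1)) = (hiN : Int) := by
            omega
          rw [hlo, hhi, PySem.List.pyRange_one, List.foldl_map, PySem.List.foldl_add,
            list_sum_range_eq]
          have hcnt : ((hiN : Int) + 1 - (loN : Int)).toNat = hiN + 1 - loN := by omega
          rw [hcnt]
          congr 1
          have hfilter : (Finset.range n).filter (fun i => loN ≤ i ∧ i ≤ hiN)
              = Finset.Ico loN (hiN + 1) := by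
            apply Finset.ext
            intro x
            simp only [Finset.mem_filter, Finset.mem_range, Finset.mem_Ico]
            omega
          rw [← Finset.sum_filter, hfilter, Finset.sum_Ico_eq_sum_range]
          apply Finset.sum_congr rfl
          intro t ht
          simp only [Finset.mem_range] at ht
          have h1 : (loN : Int) + (t : Int) = ((loN + t : Nat) : Int) := by push_cast; ring
          have h2 : (u : Int) - ((loN + t : Nat) : Int) = ((u - (loN + t) : Nat) : Int) := by
            push_cast; omega
          rw [h1, PySem.List.pyGetD_natCast, h2, PySem.List.pyGetD_natCast]
        rw [PySem.List.foldl_congr_mem _ _ _ _ hinner, PySem.List.foldl_add, list_sum_range_eq]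
        simp
      rw [hB, Finset.sum_comm]
      unfold refSum
      apply Finset.sum_congr rfl
      intro i hi
      simp only [Finset.mem_range] at hi
      -- left side: window of diagonals hitting row i; right side: prefix of row i
      have hL : ∑ u ∈ Finset.range D, (if u + 1 - m ≤ i ∧ i ≤ min u (n - 1) then cell i (u - i) else 0)
          = ∑ t ∈ Finset.range (min (i + m) D - i), cell i t := by
        have hfilter : (Finset.range D).filter (fun u => u + 1 - m ≤ i ∧ i ≤ min u (n - 1))
            = Finset.Ico i (min (i + m) D) := by
          apply Finset.ext
          intro u
          simp only [Finset.mem_filter, Finset.mem_range, Finset.mem_Ico]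
          omega
        rw [← Finset.sum_filter, hfilter, Finset.sum_Ico_eq_sum_range]
        apply Finset.sum_congr rfl
        intro t _
        have : i + t - i = t := by omega
        rw [this]
      have hR : ∑ j ∈ Finset.range m, (if (i : Int) + (j : Int) ≤ k then cell i j else 0)
          = ∑ t ∈ Finset.range (min m (K + 1 - i)), cell i t := by
        have hfilter : (Finset.range m).filter (fun j : Nat => (i : Int) + (j : Int) ≤ k)
            = Finset.range (min m (K + 1 - i)) := by
          apply Finset.ext
          intro j
          simp only [Finset.mem_filter, Finset.mem_range]
          rw [hkK]
          constructor
          · rintro ⟨h1, h2⟩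
            have : i + j ≤ K := by exact_mod_cast h2
            omega
          · intro h
            refine ⟨by omega, ?_⟩
            omega
        rw [← Finset.sum_filter, hfilter]
      rw [hL, hR]
      have hDval : (D : Int) = min k ((n : Int) + (m : Int) - 2) + 1 := by
        rw [hD]; omega
      have hcount : min (i + m) D - i = min m (K + 1 - i) := by
        have h1 : (D : Int) = min ((K : Int)) ((n : Int) + (m : Int) - 2) + 1 := by
          rw [hDval, hkK]
        omega
      rw [hcount]

-- ===== VERDICT (by name: the statement is the Claim_ definition above) =====
theorem solution_spec : Claim_equal_solution := by
  intro board k _ _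
  unfold Spec_solution
  rw [solution_eq_refSum, solution_alt_eq_refSum]
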